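-- pv_equiv track=rewrite | github.com/junkhp/atcorder | abc_176_d_me.py | check
-- ===== SOURCE A (Python) =====
-- def check(area1, area2):
--     area2_set = set(map(tuple, area2))
--     new_area1 = []
--     for p in area1:
--         for i in range(p[0]-2, p[0] + 3):
--             for j in range(p[1]-2, p[1] + 3):
--                 new_area1.append((i, j))
--         if len(set(new_area1) & area2_set) != 0:
--             return True
--     return False
-- ===== SOURCE B (Python) =====
-- def check(area1, area2):
--     area2_set = {(r[0], r[1]) for r in area2 if len(r) == 2}
--     return any((p[0] + di, p[1] + dj) in area2_set
--                for p in area1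
--                for di in range(-2, 3)
--                for dj in range(-2, 3))
-- ===== Notes on version B (the rewrite author's own statement) =====
-- stated objective: faster
-- what changed: Instead of accumulating all 5x5 block points across iterations and rebuilding a set and intersecting it with area2 after every point, B probes each of the 25 neighbors of each point directly in a hash set of area2.
import Mathlib
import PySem

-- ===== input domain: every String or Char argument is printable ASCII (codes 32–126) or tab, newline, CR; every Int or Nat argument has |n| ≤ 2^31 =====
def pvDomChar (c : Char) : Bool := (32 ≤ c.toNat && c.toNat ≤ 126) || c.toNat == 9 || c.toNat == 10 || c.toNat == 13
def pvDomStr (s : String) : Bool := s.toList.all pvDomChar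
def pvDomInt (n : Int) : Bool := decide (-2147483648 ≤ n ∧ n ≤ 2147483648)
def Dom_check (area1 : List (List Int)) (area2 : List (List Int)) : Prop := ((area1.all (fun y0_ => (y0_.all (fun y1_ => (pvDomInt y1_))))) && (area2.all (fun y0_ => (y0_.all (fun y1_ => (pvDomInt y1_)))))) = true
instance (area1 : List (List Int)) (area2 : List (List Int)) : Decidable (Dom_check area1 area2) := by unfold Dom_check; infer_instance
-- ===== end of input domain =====

-- B replaces A's growing accumulator (rebuilt into a set and intersected with area2 after
-- every point) by direct membership probes of the 25 neighbors in a set of area2; the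
-- timing run measured B faster.

-- ===== PORT A =====
-- A's Python tuples are ported as List Int for the rows of area2 and as the two-element
-- list [i, j] for the appended pairs: a Python 2-tuple (i, j) equals tuple(row) exactly
-- when row = [i, j], so this hand port of tuple equality is exact.
def checkGo (area2set : PySem.Set (List Int)) : List (List Int) → List (List Int) → Bool
  | [], _ => false
  | p :: rest, newArea1 =>
    let newArea1' :=
      (PySem.List.pyRange (PySem.List.pyGetD p 0 0 - 2) (PySem.List.pyGetD p 0 0 + 3) 1).foldl
        (fun acc i =>
          (PySem.List.pyRange (PySem.List.pyGetD p 1 0 - 2) (PySem.List.pyGetD p 1 0 + 3) 1).foldl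
            (fun acc2 j => acc2 ++ [[i, j]]) acc) newArea1
    if PySem.Set.len (PySem.Set.inter (PySem.Set.ofList newArea1') area2set) ≠ 0 then true
    else checkGo area2set rest newArea1'

def check (area1 : List (List Int)) (area2 : List (List Int)) : Bool :=
  checkGo (PySem.Set.ofList area2) area1 []

-- ===== PORT B =====
def check_alt (area1 : List (List Int)) (area2 : List (List Int)) : Bool :=
  let s : PySem.Set (Int × Int) :=
    PySem.Set.ofList ((area2.filter (fun r => r.length == 2)).map
      (fun r => (PySem.List.pyGetD r 0 0, PySem.List.pyGetD r 1 0)))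
  area1.any (fun p =>
    (PySem.List.pyRange (-2) 3 1).any (fun di =>
      (PySem.List.pyRange (-2) 3 1).any (fun dj =>
        PySem.Set.contains s (PySem.List.pyGetD p 0 0 + di, PySem.List.pyGetD p 1 0 + dj))))

-- ===== PRECONDITION & SPEC =====
-- Pre_ excludes inputs where some row of area1 has fewer than two entries: there both
-- A and B raise IndexError on p[0]/p[1].
def Pre_check (area1 : List (List Int)) (area2 : List (List Int)) : Prop :=
  ∀ p ∈ area1, 2 ≤ p.length
instance (area1 : List (List Int)) (area2 : List (List Int)) : Decidable (Pre_check area1 area2) := by unfold Pre_check; infer_instance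
def pvWitness_check : List (List Int) × List (List Int) := ([[0, 0], [5, 5]], [[1, 2], [9]])

def Spec_check (area1 : List (List Int)) (area2 : List (List Int)) (out : Bool) : Prop := out = check_alt area1 area2
instance (area1 : List (List Int)) (area2 : List (List Int)) (out : Bool) : Decidable (Spec_check area1 area2 out) := by unfold Spec_check; infer_instance

-- ===== CLAIM (what is proved, stated in full; the proofs are below) =====
def Claim_equal_check : Prop := ∀ (area1 : List (List Int)) (area2 : List (List Int)), Dom_check area1 area2 → Pre_check area1 area2 → Spec_check area1 area2 (check area1 area2)

-- ===== LEMMAS AND PROOFS =====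

-- generic: a foldl that only appends is init ++ flatMap
theorem foldl_append_flatMap {α β : Type} (g : α → List β) (l : List α) (init : List β) :
    l.foldl (fun acc x => acc ++ g x) init = init ++ l.flatMap g := by
  induction l generalizing init with
  | nil => simp
  | cons x xs ih => simp [List.foldl_cons, ih, List.append_assoc]

theorem flatMap_singleton_map {α β : Type} (f : α → β) (l : List α) :
    l.flatMap (fun x => [f x]) = l.map f := by
  induction l with
  | nil => rfl
  | cons x xs ih => simp [List.flatMap_cons, ih]

-- the block of points A appends for p, as a flatMap
def blockOf (p : List Int) : List (List Int) :=
  (PySem.List.pyRange (PySem.List.pyGetD p 0 0 - 2) (PySem.List.pyGetD p 0 0 + 3) 1).flatMap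
    (fun i =>
      (PySem.List.pyRange (PySem.List.pyGetD p 1 0 - 2) (PySem.List.pyGetD p 1 0 + 3) 1).map
        (fun j => [i, j]))

theorem block_eq (p : List Int) (acc : List (List Int)) :
    (PySem.List.pyRange (PySem.List.pyGetD p 0 0 - 2) (PySem.List.pyGetD p 0 0 + 3) 1).foldl
      (fun acc i =>
        (PySem.List.pyRange (PySem.List.pyGetD p 1 0 - 2) (PySem.List.pyGetD p 1 0 + 3) 1).foldl
          (fun acc2 j => acc2 ++ [[i, j]]) acc) acc = acc ++ blockOf p := by
  have h : (fun (acc : List (List Int)) (i : Int) =>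
      (PySem.List.pyRange (PySem.List.pyGetD p 1 0 - 2) (PySem.List.pyGetD p 1 0 + 3) 1).foldl
        (fun acc2 j => acc2 ++ [[i, j]]) acc)
      = (fun acc i => acc ++ (PySem.List.pyRange (PySem.List.pyGetD p 1 0 - 2) (PySem.List.pyGetD p 1 0 + 3) 1).map
          (fun j => [i, j])) := by
    funext a i
    rw [foldl_append_flatMap (fun j => [[i, j]]), flatMap_singleton_map (fun j => [i, j])]
  rw [h, foldl_append_flatMap]
  rfl

-- the intersection test is an existential over the list
theorem inter_test (L : List (List Int)) (t : PySem.Set (List Int)) :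
    (PySem.Set.len (PySem.Set.inter (PySem.Set.ofList L) t) ≠ 0) ↔ ∃ x ∈ L, x ∈ t := by
  constructor
  · intro h
    have hne : PySem.Set.inter (PySem.Set.ofList L) t ≠ [] := by
      intro hnil; rw [PySem.Set.len, hnil] at h; simp at h
    rcases List.exists_mem_of_ne_nil _ hne with ⟨x, hx⟩
    rw [PySem.Set.mem_inter] at hx
    exact ⟨x, (PySem.Set.mem_ofList _ _).1 hx.1, hx.2⟩
  · rintro ⟨x, hxL, hxt⟩ h
    have hx : x ∈ PySem.Set.inter (PySem.Set.ofList L) t :=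
      (PySem.Set.mem_inter _ _ _).2 ⟨(PySem.Set.mem_ofList _ _).2 hxL, hxt⟩
    have hlen : (PySem.Set.inter (PySem.Set.ofList L) t).length = 0 := by
      rw [PySem.Set.len] at h
      exact_mod_cast h
    rw [List.length_eq_zero_iff.1 hlen] at hx
    simp at hx

-- per-point hit, as a Bool
def hitB (t : PySem.Set (List Int)) (L : List (List Int)) : Bool := L.any (fun x => x ∈ t)

theorem hitB_append (t : PySem.Set (List Int)) (L M : List (List Int)) :
    hitB t (L ++ M) = (hitB t L || hitB t M) := by
  simp [hitB]

theorem hitB_true_iff (t : PySem.Set (List Int)) (L : List (List Int)) :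
    hitB t L = true ↔ ∃ x ∈ L, x ∈ t := by
  simp [hitB]

theorem checkGo_eq (t : PySem.Set (List Int)) (l : List (List Int)) (acc : List (List Int)) :
    checkGo t l acc = (l.any (fun p => hitB t acc || hitB t (blockOf p))) := by
  induction l generalizing acc with
  | nil => simp [checkGo]
  | cons p rest ih =>
    rw [checkGo]
    simp only [block_eq]
    by_cases hhit : PySem.Set.len (PySem.Set.inter (PySem.Set.ofList (acc ++ blockOf p)) t) ≠ 0
    · rw [if_pos hhit]
      have hb : (hitB t acc || hitB t (blockOf p)) = true := by
        rw [← hitB_append, hitB_true_iff]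
        exact (inter_test _ _).1 hhit
      rw [List.any_cons, hb, Bool.true_or]
    · rw [if_neg hhit, ih]
      have hb : (hitB t acc || hitB t (blockOf p)) = false := by
        cases hor : (hitB t acc || hitB t (blockOf p)) with
        | false => rfl
        | true => exact absurd ((inter_test _ _).2 ((hitB_true_iff _ _).1
            (by rw [hitB_append]; exact hor))) hhit
      have ha : hitB t acc = false := by
        cases h' : hitB t acc with
        | false => rfl
        | true => rw [h'] at hb; simp at hb
      rw [List.any_cons, hb, Bool.false_or]
      refine List.any_congr rfl (fun q => ?_)
      rw [hitB_append, hb, Bool.false_or, ha, Bool.false_or]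

-- membership in A's area2 set of a two-element list vs B's pair set
theorem mem_bridge (area2 : List (List Int)) (i j : Int) :
    ([i, j] ∈ PySem.Set.ofList area2) ↔
      ((i, j) ∈ PySem.Set.ofList ((area2.filter (fun r => r.length == 2)).map
        (fun r => (PySem.List.pyGetD r 0 0, PySem.List.pyGetD r 1 0)))) := by
  rw [PySem.Set.mem_ofList, PySem.Set.mem_ofList]
  constructor
  · intro h
    refine List.mem_map.2 ⟨[i, j], List.mem_filter.2 ⟨h, by simp⟩, ?_⟩
    simp [PySem.List.pyGetD, PySem.List.pyGet?, PySem.List.pyIdx?]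
  · intro h
    rcases List.mem_map.1 h with ⟨r, hr, heq⟩
    rcases List.mem_filter.1 hr with ⟨hrm, hlen⟩
    match r, hlen with
    | [a, b], _ =>
      simp [PySem.List.pyGetD, PySem.List.pyGet?, PySem.List.pyIdx?] at heq
      obtain ⟨rfl, rfl⟩ := heq
      exact hrm

-- per-point equivalence of the two 5×5 scans
theorem point_bridge (area2 : List (List Int)) (p : List Int) :
    hitB (PySem.Set.ofList area2) (blockOf p) =
      ((PySem.List.pyRange (-2) 3 1).any (fun di =>
        (PySem.List.pyRange (-2) 3 1).any (fun dj =>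
          PySem.Set.contains
            (PySem.Set.ofList ((area2.filter (fun r => r.length == 2)).map
              (fun r => (PySem.List.pyGetD r 0 0, PySem.List.pyGetD r 1 0))))
            (PySem.List.pyGetD p 0 0 + di, PySem.List.pyGetD p 1 0 + dj)))) := by
  set p0 := PySem.List.pyGetD p 0 0
  set p1 := PySem.List.pyGetD p 1 0
  apply Bool.eq_iff_iff.2
  simp only [hitB, blockOf, List.any_eq_true, List.mem_flatMap, List.mem_map,
    PySem.List.mem_pyRange_one, PySem.Set.contains, List.contains_iff_mem]
  constructor
  · rintro ⟨x, ⟨i, hi, j, hj, rfl⟩, hx⟩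
    refine ⟨i - p0, by omega, j - p1, by omega, ?_⟩
    have h1 : p0 + (i - p0) = i := by ring
    have h2 : p1 + (j - p1) = j := by ring
    rw [h1, h2]
    exact (mem_bridge area2 i j).1 (by simpa using hx)
  · rintro ⟨di, hdi, dj, hdj, h⟩
    exact ⟨[p0 + di, p1 + dj], ⟨p0 + di, by omega, p1 + dj, by omega, rfl⟩,
      by simpa using (mem_bridge area2 (p0 + di) (p1 + dj)).2 h⟩

-- ===== VERDICT (by name: the statement is the Claim_ definition above) =====
theorem check_spec : Claim_equal_check := by
  intro area1 area2 _ _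
  unfold Spec_check check check_alt
  rw [checkGo_eq]
  simp only [hitB, List.any_nil, Bool.false_or]
  refine List.any_congr rfl (fun p => ?_)
  have := point_bridge area2 p
  simpa [hitB] using this
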